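-- pv_equiv track=rewrite | github.com/Tolerblanc/PS | Programmers/주사위 나누기.py | roll_dice
-- ===== SOURCE A (Python) =====
-- def roll_dice(dice, idx):
--     dice_comb = [1]
--     for i in idx:
--         temp = []
--         for curr_dice in dice_comb:
--             for next_dice in dice[i - 1]:
--                 temp.append(curr_dice + next_dice)
--         dice_comb = temp[:]
--         dice_comb.sort()
--     return dice_comb
-- ===== SOURCE B (Python) =====
-- def roll_dice(dice, idx):
--     # recursive back-to-front product of the selected dice, single final sort
--     def sums(rem):
--         if not rem:
--             return [0]
--         rest = sums(rem[1:])
--         return [d + s for d in dice[rem[0] - 1] for s in rest]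
--     return sorted(1 + s for s in sums(idx))
-- ===== Notes on version B (the rewrite author's own statement) =====
-- stated objective: idiomatic
-- what changed: B builds all combination sums in one recursive back-to-front product over the selected dice and sorts once at the end, instead of A's iterative accumulator that appends pairwise sums and re-sorts after every die.
-- outside the precondition, e.g. on roll_dice([[]], [1, 5]): A returns [], B raises IndexError
import Mathlib
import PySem

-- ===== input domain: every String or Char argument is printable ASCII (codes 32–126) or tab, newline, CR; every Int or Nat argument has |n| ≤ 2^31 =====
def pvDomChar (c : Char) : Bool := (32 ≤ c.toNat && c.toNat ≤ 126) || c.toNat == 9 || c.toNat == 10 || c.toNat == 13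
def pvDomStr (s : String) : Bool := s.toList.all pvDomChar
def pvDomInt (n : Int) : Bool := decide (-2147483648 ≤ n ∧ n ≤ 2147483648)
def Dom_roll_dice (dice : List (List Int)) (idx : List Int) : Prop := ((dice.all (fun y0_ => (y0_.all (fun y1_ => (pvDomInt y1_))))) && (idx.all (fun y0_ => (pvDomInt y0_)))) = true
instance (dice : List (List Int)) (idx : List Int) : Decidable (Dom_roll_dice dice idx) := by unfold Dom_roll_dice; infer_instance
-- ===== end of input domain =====

-- B builds all combination sums in one recursive back-to-front product and sorts once;
-- A accumulates die by die, re-sorting after each die.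

-- ===== PORT A =====
-- dice[i - 1]: Python indexing (negative wraps, out-of-range raises); exact under Pre_,
-- which rules out the IndexError inputs.
def roll_dice (dice : List (List Int)) (idx : List Int) : List Int :=
  idx.foldl (fun dice_comb i =>
    let temp := dice_comb.foldl (fun t curr_dice =>
      ((PySem.List.pyGet? dice (i - 1)).getD []).foldl
        (fun t next_dice => t ++ [curr_dice + next_dice]) t) []
    PySem.List.sorted temp (fun x => x) false) [1]

-- ===== PORT B =====
def pvSums (dice : List (List Int)) : List Int → List Int
  | [] => [0]
  | i :: rem =>
    let rest := pvSums dice rem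
    ((PySem.List.pyGet? dice (i - 1)).getD []).flatMap (fun d => rest.map (fun s => d + s))

def roll_dice_alt (dice : List (List Int)) (idx : List Int) : List Int :=
  PySem.List.sorted ((pvSums dice idx).map (fun s => 1 + s)) (fun x => x) false

-- ===== PRECONDITION & SPEC =====
-- Pre_ excludes inputs where some i in idx has i-1 outside Python's index range of dice:
-- there A raises IndexError, except that when an empty selected die has already emptied the
-- accumulator A skips the bad index and returns [] while B indexes eagerly and raises.
def Pre_roll_dice (dice : List (List Int)) (idx : List Int) : Prop :=
  ∀ i ∈ idx, PySem.Raise.InRange dice.length (i - 1)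
instance (dice : List (List Int)) (idx : List Int) : Decidable (Pre_roll_dice dice idx) := by
  unfold Pre_roll_dice; infer_instance
def pvWitness_roll_dice : List (List Int) × List Int := ([[1, 2], [3, 4]], [1, 2])

def Spec_roll_dice (dice : List (List Int)) (idx : List Int) (out : List Int) : Prop := out = roll_dice_alt dice idx
instance (dice : List (List Int)) (idx : List Int) (out : List Int) : Decidable (Spec_roll_dice dice idx out) := by unfold Spec_roll_dice; infer_instance

-- ===== CLAIM (what is proved, stated in full; the proofs are below) =====
def Claim_equal_roll_dice : Prop := ∀ (dice : List (List Int)) (idx : List Int), Dom_roll_dice dice idx → Pre_roll_dice dice idx → Spec_roll_dice dice idx (roll_dice dice idx)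

-- ===== LEMMAS AND PROOFS =====

-- A's inner two loops build l.flatMap (fun c => die.map (c + ·)), accumulator-generalised.
theorem crossA_eq (l die acc : List Int) :
    l.foldl (fun t c => die.foldl (fun t n => t ++ [c + n]) t) acc
      = acc ++ l.flatMap (fun c => die.map (fun n => c + n)) := by
  induction l generalizing acc with
  | nil => simp
  | cons c l ih =>
    simp only [List.foldl_cons, List.flatMap_cons, ih]
    have : ∀ (a : List Int) (d : List Int),
        d.foldl (fun t n => t ++ [c + n]) a = a ++ d.map (fun n => c + n) := by
      intro a d
      induction d generalizing a with
      | nil => simp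
      | cons n d ih2 => simp [ih2]
    rw [this]; simp

-- The key invariant: running A's loop from a sorted start equals one final sort of the
-- full product built by B's recursion.
theorem foldl_eq_sorted (dice : List (List Int)) (idx : List Int) :
    ∀ l : List Int,
      idx.foldl (fun dice_comb i =>
          let temp := dice_comb.foldl (fun t curr_dice =>
            ((PySem.List.pyGet? dice (i - 1)).getD []).foldl
              (fun t next_dice => t ++ [curr_dice + next_dice]) t) []
          PySem.List.sorted temp (fun x => x) false)
        (PySem.List.sorted l (fun x => x) false)
      = PySem.List.sorted
          (l.flatMap (fun c => (pvSums dice idx).map (fun s => c + s))) (fun x => x) false := by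
  induction idx with
  | nil =>
    intro l
    simp [pvSums]
  | cons i rem ih =>
    intro l
    simp only [List.foldl_cons]
    rw [crossA_eq]
    set die := (PySem.List.pyGet? dice (i - 1)).getD [] with hdie
    rw [List.nil_append, ih]
    apply PySem.List.sorted_eq_sorted_of_perm _ _ _ (fun a b h => h)
    rw [List.flatMap_assoc]
    have hcongr : ∀ m : List Int,
        m.flatMap (fun c => (die.map (fun n => c + n)).flatMap
            (fun c => (pvSums dice rem).map (fun s => c + s)))
          = m.flatMap (fun c => (pvSums dice (i :: rem)).map (fun s => c + s)) := by
      intro m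
      apply List.flatMap_congr
      intro c _
      simp only [pvSums, ← hdie, List.flatMap_map, List.map_flatMap, List.map_map]
      apply List.flatMap_congr
      intro d _
      congr 1
      funext s
      simp [Int.add_assoc]
    rw [hcongr]
    exact (PySem.List.sorted_perm l (fun x => x) false).flatMap_right _

-- ===== VERDICT (by name: the statement is the Claim_ definition above) =====
theorem roll_dice_spec : Claim_equal_roll_dice := by
  intro dice idx _ _
  unfold Spec_roll_dice roll_dice roll_dice_alt
  have h1 : ([1] : List Int) = PySem.List.sorted [1] (fun x => x) false := by decide
  rw [h1, foldl_eq_sorted]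
  simp
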